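-- pv_equiv track=rewrite | github.com/Gabe1290/pythongm | widgets/asset_tree/asset_utils.py | sanitize_asset_name
-- ===== SOURCE A (Python) =====
-- def sanitize_asset_name(name: str) -> str:
--     """
--     Sanitize a filename to be a valid asset name
--     Removes or replaces problematic characters
--     """
--     if not name:
--         return "unnamed_asset"
--
--     # Remove invalid characters
--     invalid_chars = ['<', '>', ':', '"', '/', '\\', '|', '?', '*']
--     sanitized = name
--
--     for char in invalid_chars:
--         sanitized = sanitized.replace(char, '_')
--
--     # Remove leading/trailing whitespace and dots
--     sanitized = sanitized.strip(' .')
--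
--     # Ensure not empty after sanitization
--     if not sanitized:
--         return "unnamed_asset"
--
--     # Limit length
--     if len(sanitized) > 100:
--         sanitized = sanitized[:100]
--
--     return sanitized
-- ===== SOURCE B (Python) =====
-- def sanitize_asset_name(name: str) -> str:
--     if not name:
--         return "unnamed_asset"
--     invalid = set('<>:"/\\|?*')
--     sanitized = ''.join('_' if c in invalid else c for c in name).strip(' .')
--     if not sanitized:
--         return "unnamed_asset"
--     return sanitized[:100]
-- ===== Notes on version B (the rewrite author's own statement) =====
-- stated objective: idiomatic
-- what changed: Replaces A's nine sequential whole-string replace passes with a single pass over the characters that maps each character found in a precomputed invalid-character set to an underscore (one join over the string), and applies the length-100 truncation unconditionally.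
import Mathlib
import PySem

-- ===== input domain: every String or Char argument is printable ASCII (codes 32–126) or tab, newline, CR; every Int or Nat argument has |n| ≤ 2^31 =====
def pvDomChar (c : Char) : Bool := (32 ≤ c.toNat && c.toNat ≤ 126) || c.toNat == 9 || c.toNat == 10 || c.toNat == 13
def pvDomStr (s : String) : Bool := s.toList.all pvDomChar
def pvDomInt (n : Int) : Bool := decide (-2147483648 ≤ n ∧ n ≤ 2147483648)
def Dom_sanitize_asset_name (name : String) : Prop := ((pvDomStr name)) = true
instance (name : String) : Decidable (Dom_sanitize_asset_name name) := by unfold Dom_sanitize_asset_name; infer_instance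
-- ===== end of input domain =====

-- B builds the sanitized string in one membership-driven pass over the characters
-- instead of A's nine sequential whole-string replace passes (objective: idiomatic; same O(n) cost).

-- ===== PORT A =====
def sanitize_asset_name (name : String) : String :=
  if name = "" then "unnamed_asset"
  else
    let invalid_chars : List String := ["<", ">", ":", "\"", "/", "\\", "|", "?", "*"]
    let sanitized := invalid_chars.foldl (fun s ch => PySem.Str.replace s ch "_") name
    let sanitized := PySem.Str.stripChars sanitized " ."
    if sanitized = "" then "unnamed_asset"
    else if 100 < PySem.Str.len sanitized then PySem.Str.slice sanitized none (some 100)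
    else sanitized

-- ===== PORT B =====
-- invalid = set('<>:"/\\|?*')
def pvInvalidSet : PySem.Set Char := PySem.Set.ofList "<>:\"/\\|?*".toList

def sanitize_asset_name_alt (name : String) : String :=
  if name = "" then "unnamed_asset"
  else
    -- ''.join('_' if c in invalid else c for c in name).strip(' .')
    let sanitized := PySem.Str.stripChars
      (String.ofList (name.toList.map (fun c => if pvInvalidSet.contains c then '_' else c))) " ."
    if sanitized = "" then "unnamed_asset"
    else PySem.Str.slice sanitized none (some 100)

-- ===== PRECONDITION & SPEC =====
def Spec_sanitize_asset_name (name : String) (out : String) : Prop := out = sanitize_asset_name_alt name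
instance (name : String) (out : String) : Decidable (Spec_sanitize_asset_name name out) := by unfold Spec_sanitize_asset_name; infer_instance

-- ===== CLAIM (what is proved, stated in full; the proofs are below) =====
def Claim_equal_sanitize_asset_name : Prop := ∀ (name : String), Dom_sanitize_asset_name name → Spec_sanitize_asset_name name (sanitize_asset_name name)

-- ===== LEMMAS AND PROOFS =====

-- One pass of str.replace with a single-char pattern is a pointwise map.
theorem go_single (a b : Char) : ∀ (l : List Char) (fuel : Nat) (acc : List Char),
    l.length ≤ fuel →
    PySem.Chars.replace.go [a] [b] fuel l acc
      = acc.reverse ++ l.map (fun c => if c = a then b else c) := by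
  intro l
  induction l with
  | nil =>
    intro fuel acc _
    cases fuel <;> simp [PySem.Chars.replace.go]
  | cons c t ih =>
    intro fuel acc hle
    cases fuel with
    | zero => simp at hle
    | succ fuel =>
      rw [PySem.Chars.replace.go]
      have hpre : ([a].isPrefixOf (c :: t)) = (a == c) := by simp [List.isPrefixOf]
      rw [hpre]
      by_cases hca : a = c
      · rw [if_pos (by simp [hca])]
        have hdrop : List.drop ([a].length) (c :: t) = t := by simp
        rw [hdrop, ih fuel ([b].reverse ++ acc) (Nat.le_of_succ_le_succ hle)]
        simp [hca.symm]
      · rw [if_neg (by simp [hca])]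
        rw [ih fuel (c :: acc) (Nat.le_of_succ_le_succ hle)]
        simp [Ne.symm hca]

theorem replace_single (a b : Char) (cs : List Char) :
    PySem.Chars.replace cs [a] [b] = cs.map (fun c => if c = a then b else c) := by
  rw [PySem.Chars.replace]
  simp only [List.isEmpty_cons, Bool.false_eq_true, if_false]
  simpa using go_single a b cs cs.length [] (le_refl _)

-- A's nine sequential single-char replace passes compute B's one-pass map, characterwise.
theorem foldA (name : String) :
    (["<", ">", ":", "\"", "/", "\\", "|", "?", "*"].foldl
        (fun s ch => PySem.Str.replace s ch "_") name).toList
      = name.toList.map (fun c => if pvInvalidSet.contains c then '_' else c) := by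
  have h1 : "<".toList = ['<'] := rfl
  have h2 : ">".toList = ['>'] := rfl
  have h3 : ":".toList = [':'] := rfl
  have h4 : "\"".toList = ['"'] := rfl
  have h5 : "/".toList = ['/'] := rfl
  have h6 : "\\".toList = ['\\'] := rfl
  have h7 : "|".toList = ['|'] := rfl
  have h8 : "?".toList = ['?'] := rfl
  have h9 : "*".toList = ['*'] := rfl
  have hu : "_".toList = ['_'] := rfl
  simp only [List.foldl, PySem.Str.replace, String.toList_ofList,
    h1, h2, h3, h4, h5, h6, h7, h8, h9, hu, replace_single, List.map_map]
  have hset : pvInvalidSet = ['<','>',':','"','/','\\','|','?','*'] := by decide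
  apply List.map_congr_left
  intro c _
  rw [hset]
  by_cases e1 : c = '<'; · simp [e1]
  by_cases e2 : c = '>'; · simp [e2]
  by_cases e3 : c = ':'; · simp [e3]
  by_cases e4 : c = '"'; · simp [e4]
  by_cases e5 : c = '/'; · simp [e5]
  by_cases e6 : c = '\\'; · simp [e6]
  by_cases e7 : c = '|'; · simp [e7]
  by_cases e8 : c = '?'; · simp [e8]
  by_cases e9 : c = '*'; · simp [e9]
  simp [e1, e2, e3, e4, e5, e6, e7, e8, e9]

theorem strip_congr (s t chars : String) (h : s.toList = t.toList) :
    PySem.Str.stripChars s chars = PySem.Str.stripChars t chars := by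
  simp [PySem.Str.stripChars, h]

theorem slice_of_short (s : String) (h : ¬ 100 < PySem.Str.len s) :
    PySem.Str.slice s none (some 100) = s := by
  rw [PySem.Str.slice]
  rw [show PySem.Chars.slice s.toList none (some 100) = s.toList.take (Int.toNat 100) from by
    simpa [PySem.Chars.slice_eq_listSlice] using PySem.List.slice_to s.toList (b := 100) (by omega)]
  have hlen : s.toList.length ≤ 100 := by
    simp only [PySem.Str.len, not_lt] at h; exact_mod_cast h
  rw [List.take_of_length_le (by simpa using hlen)]
  simp

-- ===== VERDICT (by name: the statement is the Claim_ definition above) =====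
theorem sanitize_asset_name_spec : Claim_equal_sanitize_asset_name := by
  intro name _
  unfold Spec_sanitize_asset_name sanitize_asset_name sanitize_asset_name_alt
  by_cases h0 : name = ""
  · simp [h0]
  · simp only [if_neg h0]
    have hstrip : PySem.Str.stripChars
        (["<", ">", ":", "\"", "/", "\\", "|", "?", "*"].foldl
          (fun s ch => PySem.Str.replace s ch "_") name) " ."
        = PySem.Str.stripChars
          (String.ofList (name.toList.map (fun c => if pvInvalidSet.contains c then '_' else c)))
          " ." :=
      strip_congr _ _ _ (by rw [foldA]; simp)
    rw [hstrip]
    by_cases h1 : PySem.Str.stripChars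
        (String.ofList (name.toList.map (fun c => if pvInvalidSet.contains c then '_' else c)))
        " ." = ""
    · rw [if_pos h1, if_pos h1]
    · rw [if_neg h1, if_neg h1]
      by_cases h2 : 100 < PySem.Str.len (PySem.Str.stripChars
          (String.ofList (name.toList.map (fun c => if pvInvalidSet.contains c then '_' else c)))
          " .")
      · rw [if_pos h2]
      · rw [if_neg h2]
        exact (slice_of_short _ h2).symm
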